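-- pv_equiv track=rewrite | github.com/alex-yung-github/AI | 1.8othellopt2/othello_imports.py | makeQuestionBoardNum
-- ===== SOURCE A (Python) =====
-- def makeQuestionBoardNum(board, bareindex):
--     board = "???????????" + board + "???????????"
--     count = 1
--     added = 0
--     row = int(bareindex/7)
--     add = 9
--     for i in range(10, len(board)):
--         if(count == (10)):
--             board = board[0:i] + "??" + board[i:]
--             count = 0
--             if(int(i/10) <= row):
--                 add += 2
--         count+=1
--     return add
-- ===== SOURCE B (Python) =====
-- def makeQuestionBoardNum(board, bareindex):
--     # closed form: the loop triggers at i = 19, 29, ..., i.e. floor((len+12)/10) times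
--     # on the padded board of length len(board)+22, and adds 2 for each trigger index k <= row
--     row = int(bareindex / 7)
--     cap = (len(board) + 12) // 10
--     return 9 + 2 * max(0, min(row, cap))
-- ===== Notes on version B (the rewrite author's own statement) =====
-- stated objective: faster
-- what changed: Replaced the O(n^2) loop (which repeatedly rebuilds the padded board by string slicing) with a closed-form formula 9 + 2*max(0, min(row, (len(board)+12)//10)).
import Mathlib
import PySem

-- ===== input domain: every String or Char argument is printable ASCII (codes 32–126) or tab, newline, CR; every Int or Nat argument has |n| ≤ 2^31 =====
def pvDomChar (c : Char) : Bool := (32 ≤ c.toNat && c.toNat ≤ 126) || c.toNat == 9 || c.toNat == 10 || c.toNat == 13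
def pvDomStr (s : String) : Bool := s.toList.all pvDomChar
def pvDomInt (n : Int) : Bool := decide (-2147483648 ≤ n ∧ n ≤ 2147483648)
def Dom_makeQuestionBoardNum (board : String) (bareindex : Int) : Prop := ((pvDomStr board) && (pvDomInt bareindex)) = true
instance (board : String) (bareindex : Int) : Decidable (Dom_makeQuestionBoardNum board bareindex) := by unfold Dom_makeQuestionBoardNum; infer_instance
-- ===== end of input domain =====

-- B replaces A's quadratic slicing loop by the closed form 9 + 2*max(0, min(row, (len+12)//10)).

-- ===== PORT A =====
-- loop body of A: state is (board, count, add); i is the loop index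
-- int(i/10) and int(bareindex/7) are ported as Int.tdiv (truncation toward zero),
-- exact here since |i|, |bareindex| ≤ 2^31+45 keep the float division exact enough to truncate correctly
def pvStepA (row : Int) (st : List Char × Int × Int) (i : Int) : List Char × Int × Int :=
  let b := st.1; let count := st.2.1; let add := st.2.2
  if count == 10 then
    let b' := PySem.List.slice b (some 0) (some i) ++ ['?', '?'] ++ PySem.List.slice b (some i) none
    let add' := if Int.tdiv i 10 ≤ row then add + 2 else add
    (b', 0 + 1, add')
  else (b, count + 1, add)

def makeQuestionBoardNum (board : String) (bareindex : Int) : Int :=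
  let b0 : List Char := "???????????".toList ++ board.toList ++ "???????????".toList
  let row : Int := Int.tdiv bareindex 7
  let res := (PySem.List.pyRange 10 (b0.length : Int) 1).foldl (pvStepA row) (b0, 1, 9)
  res.2.2

-- ===== PORT B =====
def makeQuestionBoardNum_alt (board : String) (bareindex : Int) : Int :=
  let row : Int := Int.tdiv bareindex 7
  let cap : Int := PySem.Int.floordiv ((board.toList.length : Int) + 12) 10
  9 + 2 * max 0 (min row cap)

-- ===== PRECONDITION & SPEC =====
def Spec_makeQuestionBoardNum (board : String) (bareindex : Int) (out : Int) : Prop := out = makeQuestionBoardNum_alt board bareindex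
instance (board : String) (bareindex : Int) (out : Int) : Decidable (Spec_makeQuestionBoardNum board bareindex out) := by unfold Spec_makeQuestionBoardNum; infer_instance

-- ===== CLAIM (what is proved, stated in full; the proofs are below) =====
def Claim_equal_makeQuestionBoardNum : Prop := ∀ (board : String) (bareindex : Int), Dom_makeQuestionBoardNum board bareindex → Spec_makeQuestionBoardNum board bareindex (makeQuestionBoardNum board bareindex)

-- ===== LEMMAS AND PROOFS =====

-- invariant of A's loop: after n iterations count = n % 10 + 1 and add = 9 + 2*clamp(row, 0, n/10)
theorem pvStepA_invariant (row : Int) (n : Nat) (b0 : List Char) :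
    ∃ b, (PySem.List.pyRange 10 (10 + (n : Int)) 1).foldl (pvStepA row) (b0, 1, 9)
      = (b, ((n % 10 : Nat) : Int) + 1, 9 + 2 * max 0 (min row ((n : Int) / 10))) := by
  induction n with
  | zero =>
      refine ⟨b0, ?_⟩
      rw [show ((10 : Int) + (0 : Nat)) = 10 by norm_num,
        PySem.List.pyRange_one_eq_nil (by omega)]
      simp
  | succ m ih =>
      obtain ⟨b, hb⟩ := ih
      rw [show ((10 : Int) + ((m + 1 : Nat) : Int)) = (10 + (m : Int)) + 1 by push_cast; ring,
        PySem.List.pyRange_one_succ_right (by omega), List.foldl_append, hb]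
      simp only [List.foldl_cons, List.foldl_nil, pvStepA]
      by_cases h9 : m % 10 = 9
      · have hc : (((m % 10 : Nat) : Int) + 1 == (10 : Int)) = true := by
          simp [h9]
        have hdiv : Int.tdiv (10 + (m : Int)) 10 = ((m : Int)) / 10 + 1 := by
          rw [Int.tdiv_eq_ediv_of_nonneg (by positivity)]
          omega
        rw [hc]
        simp only [if_true, hdiv]
        by_cases hr : (m : Int) / 10 + 1 ≤ row
        · refine ⟨_, Prod.ext rfl (Prod.ext ?_ ?_)⟩
          · show ((0 : Int) + 1) = ((m + 1 : Nat) % 10 : Nat) + 1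
            omega
          · show (if (m : Int) / 10 + 1 ≤ row then 9 + 2 * max 0 (min row ((m : Int) / 10)) + 2
                else 9 + 2 * max 0 (min row ((m : Int) / 10)))
              = 9 + 2 * max 0 (min row (((m + 1 : Nat) : Int) / 10))
            rw [if_pos hr]
            have : ((m + 1 : Nat) : Int) / 10 = (m : Int) / 10 + 1 := by omega
            rw [this]
            omega
        · refine ⟨_, Prod.ext rfl (Prod.ext ?_ ?_)⟩
          · show ((0 : Int) + 1) = ((m + 1 : Nat) % 10 : Nat) + 1
            omega
          · show (if (m : Int) / 10 + 1 ≤ row then 9 + 2 * max 0 (min row ((m : Int) / 10)) + 2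
                else 9 + 2 * max 0 (min row ((m : Int) / 10)))
              = 9 + 2 * max 0 (min row (((m + 1 : Nat) : Int) / 10))
            rw [if_neg hr]
            have : ((m + 1 : Nat) : Int) / 10 = (m : Int) / 10 + 1 := by omega
            rw [this]
            omega
      · have hc : (((m % 10 : Nat) : Int) + 1 == (10 : Int)) = false := by
          simp only [beq_eq_false_iff_ne, ne_eq]
          intro h; omega
        rw [hc]
        simp only [Bool.false_eq_true, if_false]
        refine ⟨b, Prod.ext rfl (Prod.ext ?_ ?_)⟩
        · show ((m % 10 : Nat) : Int) + 1 + 1 = ((m + 1 : Nat) % 10 : Nat) + 1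
          omega
        · show 9 + 2 * max 0 (min row ((m : Int) / 10))
            = 9 + 2 * max 0 (min row (((m + 1 : Nat) : Int) / 10))
          have : ((m + 1 : Nat) : Int) / 10 = (m : Int) / 10 := by omega
          rw [this]

theorem pv_main (board : String) (bareindex : Int) :
    makeQuestionBoardNum board bareindex = makeQuestionBoardNum_alt board bareindex := by
  obtain ⟨b, hb⟩ := pvStepA_invariant (Int.tdiv bareindex 7) (board.toList.length + 12)
    ("???????????".toList ++ board.toList ++ "???????????".toList)
  simp only [makeQuestionBoardNum, makeQuestionBoardNum_alt]
  rw [show (("???????????".toList ++ board.toList ++ "???????????".toList).length : Int)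
      = 10 + ((board.toList.length + 12 : Nat) : Int) by
        simp [List.length_append]
        ring]
  rw [hb, PySem.Int.floordiv_eq_ediv_of_pos (by norm_num)]
  push_cast
  ring_nf

-- ===== VERDICT (by name: the statement is the Claim_ definition above) =====
theorem makeQuestionBoardNum_spec : Claim_equal_makeQuestionBoardNum := by
  intro board bareindex _
  exact pv_main board bareindex
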